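-- pv_equiv track=rewrite | github.com/root338/YMTools | YMConfig/dingRobot.py | groupName
-- ===== SOURCE A (Python) =====
-- def groupName(bundleIdentifier, result, method):
--     groupKey = "successGroupName" if result else "failureGroupName"
--     def handleGroupNameDict(dict):
--         group = dict.get(method if method in dict else "default")
--         if not group:
--             return dict.get(groupKey if groupKey in dict else "groupName")
--         return group.get(groupKey if groupKey in group else "groupName")
--     def isContains(mObj):
--         if isinstance(mObj, str) and mObj == bundleIdentifier:
--             return True
--         elif isinstance(mObj, tuple) and bundleIdentifier in mObj:
--             return True
--         # elif isinstance(mObj, list) and mObj.count(bundleIdentifier):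
--         #     return True
--         # elif isinstance(mObj, set) and bundleIdentifier in mObj:
--         #     return True
--         else:
--             return False
--     for (key, value) in allGroupName().items():
--         if isContains(key):
--             return handleGroupNameDict(value)
--     return None
--
-- def allGroupName():
--     return {
--         (
--             "Bundle Identifier",
--             "Bundle Identifier"
--         ) : {
--             "app-store(上传的渠道)" : {
--                 "successGroupName" : "group key",
--                 "failureGroupName" : "group key",
--             },
--             "default" : {
--                 "successGroupName" : "group key",
--                 "failureGroupName" : "group key",
--             }
--         },
--         "Bundle Identifier" : {
--             "default" : {
--                 "successGroupName" : "group key",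
--                 "failureGroupName" : "group key",
--             }
--         }
--     }
-- ===== SOURCE B (Python) =====
-- def allGroupName():
--     return {
--         (
--             "Bundle Identifier",
--             "Bundle Identifier"
--         ) : {
--             "app-store(上传的渠道)" : {
--                 "successGroupName" : "group key",
--                 "failureGroupName" : "group key",
--             },
--             "default" : {
--                 "successGroupName" : "group key",
--                 "failureGroupName" : "group key",
--             }
--         },
--         "Bundle Identifier" : {
--             "default" : {
--                 "successGroupName" : "group key",
--                 "failureGroupName" : "group key",
--             }
--         }
--     }
--
-- def groupName(bundleIdentifier, result, method):
--     groupKey = "successGroupName" if result else "failureGroupName"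
--     # Flatten the nested config into one path table keyed by
--     # (name, method, groupKey) triples; first wins on overlaps.
--     flat = {}
--     for key, conf in allGroupName().items():
--         for name in (key if isinstance(key, tuple) else (key,)):
--             for meth, group in conf.items():
--                 for gk, val in group.items():
--                     flat.setdefault((name, meth, gk), val)
--     # Resolve by trying fully-qualified fallback paths in priority order.
--     for path in ((bundleIdentifier, method, groupKey),
--                  (bundleIdentifier, method, "groupName"),
--                  (bundleIdentifier, "default", groupKey),
--                  (bundleIdentifier, "default", "groupName")):
--         if path in flat:
--             return flat[path]
--     return None
-- ===== Notes on version B (the rewrite author's own statement) =====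
-- stated objective: alternative
-- what changed: B flattens the nested config into a single path table keyed by (name, method, groupKey) triples and resolves by trying four fully-qualified fallback paths in priority order, eliminating A's per-entry scan with type dispatch and the nested handleGroupNameDict fallback resolver.
import Mathlib
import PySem

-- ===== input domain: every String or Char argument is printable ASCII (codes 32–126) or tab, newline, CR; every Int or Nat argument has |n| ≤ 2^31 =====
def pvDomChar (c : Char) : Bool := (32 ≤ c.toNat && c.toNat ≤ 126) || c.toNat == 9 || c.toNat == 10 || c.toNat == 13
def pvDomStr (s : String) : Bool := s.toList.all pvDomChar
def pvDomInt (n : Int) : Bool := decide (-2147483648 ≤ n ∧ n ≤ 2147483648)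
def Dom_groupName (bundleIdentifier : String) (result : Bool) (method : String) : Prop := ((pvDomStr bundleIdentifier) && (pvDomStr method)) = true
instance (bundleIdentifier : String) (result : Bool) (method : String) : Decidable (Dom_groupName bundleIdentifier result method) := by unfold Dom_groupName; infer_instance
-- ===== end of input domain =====

-- B flattens the nested config into a path table keyed by (name, method, groupKey)
-- triples and resolves via four fallback paths, replacing A's scan + nested resolver.

-- shared module data: the fixed dict returned by allGroupName(); outer keys are
-- heterogeneous (str or tuple of str), modelled by PyKey
inductive PyKey
  | s : String → PyKey
  | t : List String → PyKey
deriving DecidableEq, Repr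

def innerD : PySem.Dict String String :=
  PySem.Dict.ofList [("successGroupName", "group key"), ("failureGroupName", "group key")]

def allGroupName : List (PyKey × PySem.Dict String (PySem.Dict String String)) :=
  [ (PyKey.t ["Bundle Identifier", "Bundle Identifier"],
     PySem.Dict.ofList [("app-store(上传的渠道)", innerD), ("default", innerD)]),
    (PyKey.s "Bundle Identifier",
     PySem.Dict.ofList [("default", innerD)]) ]

-- ===== PORT A =====
def handleGroupNameDict (method groupKey : String)
    (d : PySem.Dict String (PySem.Dict String String)) : Option String :=
  match d.get? (if d.contains method then method else "default") with
  | none => none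
      -- Python's falsy branch 'return dict.get(…)' would return a dict (not a str);
      -- it is unreachable: every value dict of allGroupName has key "default" with a
      -- non-empty dict value, so 'group' is always truthy. Ported as 'none'.
  | some group =>
      if group.items.isEmpty then none   -- same unreachable falsy branch (empty dict)
      else group.get? (if group.contains groupKey then groupKey else "groupName")

def isContains (bundleIdentifier : String) (mObj : PyKey) : Bool :=
  match mObj with
  | .s str => str == bundleIdentifier
  | .t tup => tup.contains bundleIdentifier

def groupNameLoop (bundleIdentifier groupKey method : String) :
    List (PyKey × PySem.Dict String (PySem.Dict String String)) → Option String
  | [] => none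
  | (key, value) :: rest =>
      if isContains bundleIdentifier key then handleGroupNameDict method groupKey value
      else groupNameLoop bundleIdentifier groupKey method rest

def groupName (bundleIdentifier : String) (result : Bool) (method : String) : Option String :=
  let groupKey := if result then "successGroupName" else "failureGroupName"
  groupNameLoop bundleIdentifier groupKey method allGroupName

-- ===== PORT B =====
def expandKey (key : PyKey) : List String :=
  match key with
  | .s str => [str]
  | .t tup => tup

-- dict.setdefault over a triple-keyed path table
def setdefault3 (t : PySem.Dict (String × String × String) String)
    (k : String × String × String) (v : String) : PySem.Dict (String × String × String) String :=
  if t.contains k then t else t.insert k v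

def buildFlat (items : List (PyKey × PySem.Dict String (PySem.Dict String String))) :
    PySem.Dict (String × String × String) String :=
  items.foldl (fun fl kv =>
    (expandKey kv.1).foldl (fun fl name =>
      kv.2.items.foldl (fun fl mg =>
        mg.2.items.foldl (fun fl gv =>
          setdefault3 fl (name, mg.1, gv.1) gv.2) fl) fl) fl) PySem.Dict.empty

def tryPaths (fl : PySem.Dict (String × String × String) String) :
    List (String × String × String) → Option String
  | [] => none
  | p :: rest =>
      if fl.contains p then fl.get? p else tryPaths fl rest

def groupName_alt (bundleIdentifier : String) (result : Bool) (method : String) : Option String :=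
  let groupKey := if result then "successGroupName" else "failureGroupName"
  let fl := buildFlat allGroupName
  tryPaths fl
    [ (bundleIdentifier, method, groupKey),
      (bundleIdentifier, method, "groupName"),
      (bundleIdentifier, "default", groupKey),
      (bundleIdentifier, "default", "groupName") ]

-- ===== PRECONDITION & SPEC =====
def Spec_groupName (bundleIdentifier : String) (result : Bool) (method : String) (out : Option String) : Prop := out = groupName_alt bundleIdentifier result method
instance (bundleIdentifier : String) (result : Bool) (method : String) (out : Option String) : Decidable (Spec_groupName bundleIdentifier result method out) := by unfold Spec_groupName; infer_instance

-- ===== CLAIM (what is proved, stated in full; the proofs are below) =====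
def Claim_equal_groupName : Prop := ∀ (bundleIdentifier : String) (result : Bool) (method : String), Dom_groupName bundleIdentifier result method → Spec_groupName bundleIdentifier result method (groupName bundleIdentifier result method)

-- ===== LEMMAS AND PROOFS =====
theorem buildFlat_eval :
    buildFlat allGroupName = PySem.Dict.ofList
      [ (("Bundle Identifier", "app-store(上传的渠道)", "successGroupName"), "group key"),
        (("Bundle Identifier", "app-store(上传的渠道)", "failureGroupName"), "group key"),
        (("Bundle Identifier", "default", "successGroupName"), "group key"),
        (("Bundle Identifier", "default", "failureGroupName"), "group key") ] := by
  decide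

-- ===== VERDICT (by name: the statement is the Claim_ definition above) =====
theorem groupName_spec : Claim_equal_groupName := by
  intro bid result method _
  unfold Spec_groupName groupName groupName_alt
  rw [buildFlat_eval]
  by_cases hb : bid = "Bundle Identifier"
  · subst hb
    by_cases h1 : method = "app-store(上传的渠道)"
    · subst h1; cases result <;> rfl
    · by_cases h2 : method = "default"
      · subst h2; cases result <;> rfl
      · have n1 : ¬("app-store(上传的渠道)" = method) := fun h => h1 h.symm
        have n2 : ¬("default" = method) := fun h => h2 h.symm
        cases result <;>
          simp [groupNameLoop, isContains, allGroupName, handleGroupNameDict, tryPaths,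
            innerD, PySem.Dict.ofList, PySem.Dict.empty, PySem.Dict.update,
            PySem.Dict.get?, PySem.Dict.contains, PySem.Dict.insert, n1, n2]
  · have hb' : ¬("Bundle Identifier" = bid) := fun h => hb h.symm
    simp [groupNameLoop, isContains, allGroupName, tryPaths,
      PySem.Dict.ofList, PySem.Dict.empty, PySem.Dict.update,
      PySem.Dict.contains, PySem.Dict.insert, hb, hb']
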